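-- pv_equiv track=rewrite | github.com/pypi-data/pypi-code-52 | kqlmagic/Kqlmagic-0.1.111.post1-py3-none-any.whl/parameterizer.py | _normalize
-- ===== SOURCE A (Python) =====
-- def _normalize(query: str):
--     """convert query to one line without comments"""
--     lines = []
--     for line in query.split("\n"):
--         idx = line.find("//")
--         if idx >= 0:
--             lines.append(line[:idx])
--         else:
--             lines.append(line)
--     return " ".join([line.replace("\r", "").replace("\t", " ") for line in lines])
-- ===== SOURCE B (Python) =====
-- def _normalize(query: str):
--     """convert query to one line without comments"""
--     out = []
--     in_comment = False
--     i = 0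
--     n = len(query)
--     while i < n:
--         ch = query[i]
--         if ch == '\n':
--             in_comment = False
--             out.append(' ')
--         elif in_comment:
--             pass
--         elif ch == '/' and i + 1 < n and query[i + 1] == '/':
--             in_comment = True
--             i += 2
--             continue
--         elif ch == '\r':
--             pass
--         elif ch == '\t':
--             out.append(' ')
--         else:
--             out.append(ch)
--         i += 1
--     return ''.join(out)
-- ===== Notes on version B (the rewrite author's own statement) =====
-- stated objective: alternative
-- what changed: Replaces the per-line pipeline (split into a list of lines, find//slice each line, per-line replace, join) by a single left-to-right character scan with an in_comment state flag that emits the normalized output in one pass with no intermediate line list.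
import Mathlib
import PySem

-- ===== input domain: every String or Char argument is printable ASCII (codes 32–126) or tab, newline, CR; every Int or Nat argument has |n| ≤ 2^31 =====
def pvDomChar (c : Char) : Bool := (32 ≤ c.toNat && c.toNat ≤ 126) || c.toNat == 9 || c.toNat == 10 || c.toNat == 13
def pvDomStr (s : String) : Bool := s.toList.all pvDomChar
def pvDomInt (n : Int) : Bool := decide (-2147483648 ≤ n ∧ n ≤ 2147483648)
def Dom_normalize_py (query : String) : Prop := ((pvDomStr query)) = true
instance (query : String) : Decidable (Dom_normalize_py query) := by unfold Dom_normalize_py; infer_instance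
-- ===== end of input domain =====

-- B replaces A's per-line split/find/slice/replace/join pipeline by one character-level
-- state-machine pass over the whole query (objective: alternative, same cost).

-- ===== PORT A =====
-- literal transliteration of _normalize: split on "\n", per line find "//" and slice the
-- line before the comment, then join the "\r"/"\t"-cleaned lines with " ".
-- query.split("\n") always succeeds (sep nonempty), the .getD only discharges the Option.
def normalize_py (query : String) : String :=
  let lines := ((PySem.Str.split? query "\n").getD [query]).foldl
    (fun lines line =>
      let idx := PySem.Str.find line "//"
      if 0 ≤ idx then lines ++ [PySem.Str.slice line none (some idx)]
      else lines ++ [line]) []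
  PySem.Str.join " " (lines.map (fun line =>
    PySem.Str.replace (PySem.Str.replace line "\r" "") "\t" " "))

-- ===== PORT B =====
-- literal transliteration of Source B's while loop: one scan over the characters, `inC` is
-- in_comment, the elif chain in the same order; the '//' branch consumes two characters
-- (Source B's i += 2), hence the recursion on t.tail.
def pvScanB : Bool → List Char → List Char
  | _, [] => []
  | inC, c :: t =>
    if c = '\n' then ' ' :: pvScanB false t
    else if inC then pvScanB true t
    else if c = '/' ∧ t.head? = some '/' then pvScanB true t.tail
    else if c = '\r' then pvScanB false t
    else if c = '\t' then ' ' :: pvScanB false t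
    else c :: pvScanB false t
  termination_by _ cs => cs.length

def normalize_py_alt (query : String) : String := String.ofList (pvScanB false query.toList)

-- ===== PRECONDITION & SPEC =====
def Spec_normalize_py (query : String) (out : String) : Prop := out = normalize_py_alt query
instance (query : String) (out : String) : Decidable (Spec_normalize_py query out) := by unfold Spec_normalize_py; infer_instance

-- ===== CLAIM (what is proved, stated in full; the proofs are below) =====
def Claim_equal_normalize_py : Prop := ∀ (query : String), Dom_normalize_py query → Spec_normalize_py query (normalize_py query)

-- ===== LEMMAS AND PROOFS =====

def linesNl : List Char → List (List Char)
  | [] => [[]]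
  | c :: t => if c = '\n' then [] :: linesNl t
    else match linesNl t with
      | [] => [[c]]
      | l :: ls => (c :: l) :: ls

theorem linesNl_ne_nil : ∀ cs, linesNl cs ≠ []
  | [] => by simp [linesNl]
  | c :: t => by
    simp only [linesNl]
    split
    · simp
    · split <;> simp

def consOn (x : List Char) : List (List Char) → List (List Char)
  | [] => [x]
  | h :: t => (x ++ h) :: t

theorem go_spec : ∀ fuel l cur acc, l.length ≤ fuel →
    PySem.Chars.splitOn.go ['\n'] fuel l cur acc = acc.reverse ++ consOn cur.reverse (linesNl l) := by
  intro fuel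
  induction fuel with
  | zero =>
    intro l cur acc h
    have : l = [] := by cases l <;> simp_all
    subst this
    simp [PySem.Chars.splitOn.go, linesNl, consOn]
  | succ n ih =>
    intro l cur acc h
    cases l with
    | nil => simp [PySem.Chars.splitOn.go, linesNl, consOn]
    | cons c t =>
      rw [PySem.Chars.splitOn.go]
      by_cases hc : c = '\n'
      · subst hc
        have hpre : ['\n'].isPrefixOf ('\n' :: t) = true := by simp [List.isPrefixOf]
        rw [if_pos hpre]
        simp only [List.length_cons, List.length_nil, List.drop_succ_cons, List.drop_zero]
        rw [ih t [] (List.reverse cur :: acc) (by simpa using Nat.le_of_succ_le_succ h)]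
        obtain ⟨h1, t1, ht⟩ := List.exists_cons_of_ne_nil (linesNl_ne_nil t)
        simp [linesNl, ht, consOn]
      · have hpre : ['\n'].isPrefixOf (c :: t) = false := by
          simp [List.isPrefixOf]
          intro h'; exact absurd h'.symm hc
        rw [if_neg (by simp [hpre])]
        rw [ih t (c :: cur) acc (by simpa using Nat.le_of_succ_le_succ h)]
        obtain ⟨h1, t1, ht⟩ := List.exists_cons_of_ne_nil (linesNl_ne_nil t)
        simp [linesNl, ht, consOn, hc]

theorem splitOn_eq_linesNl (cs : List Char) :
    PySem.Chars.splitOn cs ['\n'] = linesNl cs := by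
  rw [PySem.Chars.splitOn, go_spec (cs.length + 1) cs [] [] (by omega)]
  obtain ⟨h1, t1, ht⟩ := List.exists_cons_of_ne_nil (linesNl_ne_nil cs)
  simp [ht, consOn]

theorem replace_go_cr : ∀ fuel l acc, l.length ≤ fuel →
    PySem.Chars.replace.go ['\r'] [] fuel l acc = acc.reverse ++ l.filter (· ≠ '\r') := by
  intro fuel
  induction fuel with
  | zero =>
    intro l acc h
    have : l = [] := by cases l <;> simp_all
    subst this; simp [PySem.Chars.replace.go]
  | succ n ih =>
    intro l acc h
    cases l with
    | nil => simp [PySem.Chars.replace.go]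
    | cons c t =>
      rw [PySem.Chars.replace.go]
      by_cases hc : c = '\r'
      · subst hc
        rw [if_pos (by simp [List.isPrefixOf])]
        simp only [List.length_cons, List.length_nil, List.drop_succ_cons, List.drop_zero]
        rw [ih t _ (by simpa using Nat.le_of_succ_le_succ h)]
        simp
      · rw [if_neg (by simp [List.isPrefixOf]; intro h'; exact absurd h'.symm hc)]
        rw [ih t _ (by simpa using Nat.le_of_succ_le_succ h)]
        simp [hc]

theorem replace_cr (l : List Char) :
    PySem.Chars.replace l ['\r'] [] = l.filter (· ≠ '\r') := by
  rw [PySem.Chars.replace]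
  simp only [List.isEmpty_cons, if_false, Bool.false_eq_true]
  exact replace_go_cr l.length l [] le_rfl

theorem replace_go_tab : ∀ fuel l acc, l.length ≤ fuel →
    PySem.Chars.replace.go ['\t'] [' '] fuel l acc
      = acc.reverse ++ l.map (fun c => if c = '\t' then ' ' else c) := by
  intro fuel
  induction fuel with
  | zero =>
    intro l acc h
    have : l = [] := by cases l <;> simp_all
    subst this; simp [PySem.Chars.replace.go]
  | succ n ih =>
    intro l acc h
    cases l with
    | nil => simp [PySem.Chars.replace.go]
    | cons c t =>
      rw [PySem.Chars.replace.go]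
      by_cases hc : c = '\t'
      · subst hc
        rw [if_pos (by simp [List.isPrefixOf])]
        simp only [List.length_cons, List.length_nil, List.drop_succ_cons, List.drop_zero]
        rw [ih t _ (by simpa using Nat.le_of_succ_le_succ h)]
        simp
      · rw [if_neg (by simp [List.isPrefixOf]; intro h'; exact absurd h'.symm hc)]
        rw [ih t _ (by simpa using Nat.le_of_succ_le_succ h)]
        simp [hc]

theorem replace_tab (l : List Char) :
    PySem.Chars.replace l ['\t'] [' '] = l.map (fun c => if c = '\t' then ' ' else c) := by
  rw [PySem.Chars.replace]
  simp only [List.isEmpty_cons, if_false, Bool.false_eq_true]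
  exact replace_go_tab l.length l [] le_rfl

def cutC : List Char → List Char
  | [] => []
  | c :: t => if c = '/' ∧ t.head? = some '/' then [] else c :: cutC t

theorem slash_prefix_iff (c : Char) (t : List Char) :
    ['/', '/'] <+: c :: t ↔ c = '/' ∧ t.head? = some '/' := by
  cases t with
  | nil => simp [List.cons_prefix_cons]
  | cons d u => simp [List.cons_prefix_cons, eq_comm]

theorem cutC_of_no_occ : ∀ l : List Char, ¬ (['/', '/'] <:+: l) → cutC l = l := by
  intro l
  induction l with
  | nil => intro _; rfl
  | cons c t ih =>
    intro h
    rw [cutC, if_neg, ih]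
    · intro hocc
      exact h (hocc.trans (List.suffix_cons c t).isInfix)
    · intro hp
      exact h ((slash_prefix_iff c t).mpr hp).isInfix

theorem cutC_take : ∀ (l : List Char) (n : Nat), ['/', '/'] <+: l.drop n →
    (∀ i < n, ¬ ['/', '/'] <+: l.drop i) → cutC l = l.take n := by
  intro l
  induction l with
  | nil =>
    intro n h _
    simp at h
  | cons c t ih =>
    intro n h hmin
    cases n with
    | zero =>
      simp only [List.drop_zero] at h
      rw [cutC, if_pos ((slash_prefix_iff c t).mp h)]
      simp
    | succ m =>
      have hne : ¬ (c = '/' ∧ t.head? = some '/') := by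
        intro hp
        exact hmin 0 (by omega) (by simpa using (slash_prefix_iff c t).mpr hp)
      rw [cutC, if_neg hne, List.take_succ_cons,
        ih m (by simpa using h) (fun i hi => by simpa using hmin (i + 1) (by omega))]

theorem cut_eq_cutC (l : List Char) :
    (if 0 ≤ PySem.Chars.find l ['/', '/'] then
      PySem.Chars.slice l none (some (PySem.Chars.find l ['/', '/'])) else l) = cutC l := by
  by_cases hf : 0 ≤ PySem.Chars.find l ['/', '/']
  · rw [if_pos hf]
    obtain ⟨hpre, hmin⟩ := PySem.Chars.find_spec hf
    rw [PySem.Chars.slice_eq_listSlice, PySem.List.slice_to l hf,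
      (cutC_take l (PySem.Chars.find l ['/', '/']).toNat hpre hmin).symm]
  · rw [if_neg hf]
    have : ¬ (['/', '/'] <:+: l) := fun h => hf ((PySem.Chars.find_nonneg_iff l _).mpr h)
    exact (cutC_of_no_occ l this).symm

def lineOut (l : List Char) : List Char :=
  (cutC l).filter (· ≠ '\r') |>.map (fun c => if c = '\t' then ' ' else c)

def glue (ls : List (List Char)) : List Char := ls.flatMap (fun l => ' ' :: lineOut l)

theorem head?_of_linesNl (t : List Char) (x : Char)
    (h : (linesNl t).headI.head? = some x) : t.head? = some x := by
  cases t with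
  | nil => simp [linesNl] at h
  | cons c u =>
    by_cases hc : c = '\n'
    · subst hc; simp [linesNl] at h
    · obtain ⟨h1, t1, ht⟩ := List.exists_cons_of_ne_nil (linesNl_ne_nil u)
      simp [linesNl, hc, ht] at h
      simp [h]

theorem pvScanB_spec (b : Bool) (cs : List Char) :
    pvScanB b cs
      = (if b then [] else lineOut (linesNl cs).headI) ++ glue (linesNl cs).tail := by
  induction b, cs using pvScanB.induct with
  | case1 b => simp [pvScanB, linesNl, lineOut, cutC, glue]
  | case2 inC t ih =>
    rw [pvScanB]
    obtain ⟨h1, t1, ht⟩ := List.exists_cons_of_ne_nil (linesNl_ne_nil t)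
    rw [ih]
    simp [linesNl, ht, glue, lineOut, cutC]
  | case3 c t hc ih =>
    rw [pvScanB, if_neg hc, if_pos rfl]
    obtain ⟨h1, t1, ht⟩ := List.exists_cons_of_ne_nil (linesNl_ne_nil t)
    rw [ih]
    simp [linesNl, ht, hc]
  | case4 inC c t hc hb hsl ih =>
    rw [pvScanB, if_neg hc, if_neg hb, if_pos hsl]
    obtain ⟨hcs, hth⟩ := hsl
    obtain ⟨t', ht'⟩ : ∃ t', t = '/' :: t' := by
      cases t with
      | nil => simp at hth
      | cons d u => simp at hth; exact ⟨u, by rw [hth]⟩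
    subst ht' hcs
    obtain ⟨h1, t1, ht⟩ := List.exists_cons_of_ne_nil (linesNl_ne_nil t')
    rw [ih]
    simp only [Bool.not_eq_true] at hb
    subst hb
    simp [linesNl, ht, lineOut, cutC, glue]
  | case5 inC t hb _hn hsl ih =>
    rw [pvScanB, if_neg (by decide), if_neg hb, if_neg hsl, if_pos rfl]
    obtain ⟨h1, t1, ht⟩ := List.exists_cons_of_ne_nil (linesNl_ne_nil t)
    rw [ih]
    simp only [Bool.not_eq_true] at hb
    subst hb
    simp [linesNl, ht, lineOut, cutC]
  | case6 inC t hb _hn hsl _hr ih =>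
    rw [pvScanB, if_neg (by decide), if_neg hb, if_neg hsl, if_neg (by decide), if_pos rfl]
    obtain ⟨h1, t1, ht⟩ := List.exists_cons_of_ne_nil (linesNl_ne_nil t)
    rw [ih]
    simp only [Bool.not_eq_true] at hb
    subst hb
    simp [linesNl, ht, lineOut, cutC]
  | case7 inC c t hc hb hsl hcr htb ih =>
    rw [pvScanB, if_neg hc, if_neg hb, if_neg hsl, if_neg hcr, if_neg htb]
    obtain ⟨h1, t1, ht⟩ := List.exists_cons_of_ne_nil (linesNl_ne_nil t)
    rw [ih]
    simp only [Bool.not_eq_true] at hb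
    subst hb
    have hh1 : ¬ (c = '/' ∧ h1.head? = some '/') := by
      rintro ⟨h', hh⟩
      exact hsl ⟨h', head?_of_linesNl t '/' (by rw [ht]; simpa using hh)⟩
    simp [linesNl, ht, hc, lineOut, cutC, hh1, hcr, htb]

theorem intercalate_space : ∀ (t : List (List Char)) (h : List Char),
    [' '].intercalate (h :: t) = h ++ t.flatMap (fun l => ' ' :: l) := by
  intro t
  induction t with
  | nil => intro h; simp [List.intercalate]
  | cons x xs ih =>
    intro h
    have hstep : List.intersperse [' '] (h :: x :: xs) = h :: [' '] :: List.intersperse [' '] (x :: xs) := by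
      simp [List.intersperse]
    simp only [List.intercalate, hstep, List.flatten_cons] at *
    rw [ih]
    simp

theorem join_space (h : List Char) (t : List (List Char)) :
    PySem.Chars.join [' '] ((h :: t).map lineOut) = lineOut h ++ glue t := by
  rw [PySem.Chars.join, List.map_cons, intercalate_space, glue]
  simp [List.flatMap_map]

theorem foldl_ite_append {α β : Type} (p : α → Prop) [DecidablePred p] (f g : α → β) :
    ∀ (xs : List α) (acc : List β),
      xs.foldl (fun a x => if p x then a ++ [f x] else a ++ [g x]) acc
        = acc ++ xs.map (fun x => if p x then f x else g x) := by
  intro xs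
  induction xs with
  | nil => intro acc; simp
  | cons x t ih => intro acc; by_cases h : p x <;> simp [h, ih]

theorem main_eq (query : String) : normalize_py query = normalize_py_alt query := by
  obtain ⟨ls, hsome, hmap⟩ : ∃ ls, PySem.Str.split? query "\n" = some ls ∧
      ls.map String.toList = PySem.Chars.splitOn query.toList ['\n'] := by
    have h := PySem.Str.split?_map query "\n"
    rw [show ("\n" : String).toList = ['\n'] by decide] at h
    rw [PySem.Chars.split?] at h
    simp only [List.isEmpty_cons, if_false, Bool.false_eq_true] at h
    exact Option.map_eq_some_iff.mp h
  rw [← String.toList_inj]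
  rw [normalize_py, normalize_py_alt]
  simp only [hsome, Option.getD_some]
  rw [foldl_ite_append (fun line => 0 ≤ PySem.Str.find line "//")
    (fun line => PySem.Str.slice line none (some (PySem.Str.find line "//"))) (fun line => line)]
  rw [PySem.Str.toList_join, String.toList_ofList]
  simp only [List.nil_append, List.map_map, List.map_map]
  have hline : ∀ line : String,
      (((fun line => PySem.Str.replace (PySem.Str.replace line "\r" "") "\t" " ") ∘
        fun line => if 0 ≤ PySem.Str.find line "//" then
          PySem.Str.slice line none (some (PySem.Str.find line "//")) else line) line).toList
        = lineOut line.toList := by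
    intro line
    simp only [Function.comp]
    rw [PySem.Str.toList_replace, PySem.Str.toList_replace]
    rw [show ("\r" : String).toList = ['\r'] by decide, show ("\t" : String).toList = ['\t'] by decide,
      show ("" : String).toList = [] by decide, show (" " : String).toList = [' '] by decide]
    rw [replace_cr, replace_tab]
    have hcut : (if 0 ≤ PySem.Str.find line "//" then
        PySem.Str.slice line none (some (PySem.Str.find line "//")) else line).toList
        = cutC line.toList := by
      rw [← cut_eq_cutC line.toList]
      rw [PySem.Str.find_eq, show ("//" : String).toList = ['/', '/'] by decide]
      by_cases h0 : 0 ≤ PySem.Chars.find line.toList ['/', '/']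
      · rw [if_pos h0, if_pos h0, PySem.Str.toList_slice, PySem.Chars.slice_eq_listSlice]
      · rw [if_neg h0, if_neg h0]
    rw [hcut, lineOut]
  have hmaps : List.map (String.toList ∘
      (fun line => PySem.Str.replace (PySem.Str.replace line "\r" "") "\t" " ") ∘ fun x =>
        if 0 ≤ PySem.Str.find x "//" then PySem.Str.slice x none (some (PySem.Str.find x "//")) else x) ls
      = List.map (lineOut ∘ String.toList) ls :=
    List.map_congr_left (fun line _ => hline line)
  rw [hmaps, ← List.map_comp_map, Function.comp_apply, hmap, splitOn_eq_linesNl]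
  obtain ⟨h1, t1, ht⟩ := List.exists_cons_of_ne_nil (linesNl_ne_nil query.toList)
  rw [ht, join_space, pvScanB_spec, String.toList_ofList, ht]
  simp

-- ===== VERDICT (by name: the statement is the Claim_ definition above) =====
theorem normalize_py_spec : Claim_equal_normalize_py := by
  intro query _
  exact main_eq query
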